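-- pv_equiv track=rewrite | github.com/michaelerne/adventofcode-2021 | day19.py | get_number_of_common_points
-- ===== SOURCE A (Python) =====
-- def get_number_of_common_points(config_1, config_2):
--     return max(
--         [
--             len(config_1[p0].intersection(config_2[p1]))
--             for p0 in config_1
--             for p1 in config_2
--         ]
--     )
-- ===== SOURCE B (Python) =====
-- def get_number_of_common_points(config_1, config_2):
--     # Inverted index: for each point, the config_1 keys whose set contains it;
--     # then one pass over config_2's points counts co-occurrences per key pair.
--     where_1 = {}
--     for i, points in config_1.items():
--         for point in points:
--             where_1.setdefault(point, []).append(i)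
--     counts = {}
--     for j, points in config_2.items():
--         for point in points:
--             for i in where_1.get(point, ()):
--                 counts[(i, j)] = counts.get((i, j), 0) + 1
--     best = 0
--     for c in counts.values():
--         best = max(best, c)
--     return best
-- ===== Notes on version B (the rewrite author's own statement) =====
-- stated objective: faster
-- what changed: Instead of intersecting every (config_1 key, config_2 key) pair of sets, B builds an inverted index from point to the config_1 keys containing it, counts co-occurrences per key pair in one pass over config_2's points, and returns the maximum count.
import Mathlib
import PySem

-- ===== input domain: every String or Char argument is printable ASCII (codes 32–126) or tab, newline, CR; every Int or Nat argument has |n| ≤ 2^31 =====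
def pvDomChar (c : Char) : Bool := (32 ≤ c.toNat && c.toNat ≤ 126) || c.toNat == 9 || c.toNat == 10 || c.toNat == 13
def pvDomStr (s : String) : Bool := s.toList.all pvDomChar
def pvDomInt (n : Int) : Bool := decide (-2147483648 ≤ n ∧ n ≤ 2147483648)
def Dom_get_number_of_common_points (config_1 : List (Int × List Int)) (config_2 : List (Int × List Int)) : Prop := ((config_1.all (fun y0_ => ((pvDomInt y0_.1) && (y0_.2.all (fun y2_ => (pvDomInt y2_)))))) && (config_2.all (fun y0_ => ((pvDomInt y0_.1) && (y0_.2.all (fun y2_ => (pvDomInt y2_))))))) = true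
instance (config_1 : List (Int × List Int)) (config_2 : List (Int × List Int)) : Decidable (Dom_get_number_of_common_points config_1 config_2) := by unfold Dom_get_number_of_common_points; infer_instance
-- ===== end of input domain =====

-- B replaces A's all-pairs set intersections by an inverted index (point → config_1 keys)
-- plus a counter over key pairs, pairing only points that actually co-occur (objective: faster).

-- ===== PORT A =====
-- max([len(config_1[p0].intersection(config_2[p1])) for p0 in config_1 for p1 in config_2])
def get_number_of_common_points (config_1 : List (Int × List Int)) (config_2 : List (Int × List Int)) : Int :=
  let d1 : PySem.Dict Int (List Int) := PySem.Dict.mk config_1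
  let d2 : PySem.Dict Int (List Int) := PySem.Dict.mk config_2
  let lens := d1.keys.flatMap (fun p0 =>
    d2.keys.map (fun p1 =>
      PySem.Set.len (PySem.Set.inter (d1.getD p0 []) (d2.getD p1 []))))
  -- max(lens); none = ValueError on the empty comprehension, excluded by Pre_
  (PySem.List.max? lens (fun x => x)).getD 0

-- ===== PORT B =====
def get_number_of_common_points_alt (config_1 : List (Int × List Int)) (config_2 : List (Int × List Int)) : Int :=
  -- where_1.setdefault(point, []).append(i)  =  modify point [] (· ++ [i])  (exact)
  let where_1 : PySem.Dict Int (List Int) :=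
    config_1.foldl (fun d a => a.2.foldl (fun d p => d.modify p [] (fun l => l ++ [a.1])) d)
      PySem.Dict.empty
  -- counts[(i, j)] = counts.get((i, j), 0) + 1
  let counts : PySem.Dict (Int × Int) Int :=
    config_2.foldl (fun d b => b.2.foldl (fun d p =>
        (where_1.getD p []).foldl (fun d i => d.insert (i, b.1) (d.getD (i, b.1) 0 + 1)) d) d)
      PySem.Dict.empty
  counts.values.foldl (fun best c => max best c) 0

-- ===== PRECONDITION & SPEC =====
-- Pre_ excludes the empty dicts (A's max([]) raises ValueError) and, on the association-list
-- encoding only, lists that encode no Python dict/set at all (duplicate keys, repeated set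
-- elements): the Nodup clauses state the well-formedness every real dict[int, set[int]]
-- argument has, so no Python input on which A returns is excluded.
def Pre_get_number_of_common_points (config_1 : List (Int × List Int)) (config_2 : List (Int × List Int)) : Prop :=
  config_1 ≠ [] ∧ config_2 ≠ [] ∧
  (config_1.map Prod.fst).Nodup ∧ (config_2.map Prod.fst).Nodup ∧
  (∀ a ∈ config_1, a.2.Nodup) ∧ (∀ b ∈ config_2, b.2.Nodup)
instance (config_1 : List (Int × List Int)) (config_2 : List (Int × List Int)) : Decidable (Pre_get_number_of_common_points config_1 config_2) := by unfold Pre_get_number_of_common_points; infer_instance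

def pvWitness_get_number_of_common_points : (List (Int × List Int)) × (List (Int × List Int)) :=
  ([(0, [1, 2]), (1, [3])], [(5, [2, 3])])

def Spec_get_number_of_common_points (config_1 : List (Int × List Int)) (config_2 : List (Int × List Int)) (out : Int) : Prop := out = get_number_of_common_points_alt config_1 config_2
instance (config_1 : List (Int × List Int)) (config_2 : List (Int × List Int)) (out : Int) : Decidable (Spec_get_number_of_common_points config_1 config_2 out) := by unfold Spec_get_number_of_common_points; infer_instance

-- ===== CLAIM (what is proved, stated in full; the proofs are below) =====
def Claim_equal_get_number_of_common_points : Prop := ∀ (config_1 : List (Int × List Int)) (config_2 : List (Int × List Int)), Dom_get_number_of_common_points config_1 config_2 → Pre_get_number_of_common_points config_1 config_2 → Spec_get_number_of_common_points config_1 config_2 (get_number_of_common_points config_1 config_2)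
-- ===== LEMMAS AND PROOFS =====

-- |a.2 ∩ b.2| as A computes it (Set.len (Set.inter a.2 b.2) definitionally)
def pvF (a b : Int × List Int) : Int := ((a.2.filter (fun p => b.2.contains p)).length : Int)
-- A's comprehension, written over the pair lists
def pvLens (c1 c2 : List (Int × List Int)) : List Int := c1.flatMap (fun a => c2.map (fun b => pvF a b))
-- the config_1 keys whose set contains point p, in order
def pvWho (c1 : List (Int × List Int)) (p : Int) : List Int := (c1.filter (fun a => p ∈ a.2)).map Prod.fst
-- the stream of (i, j) co-occurrence events B counts
def pvOccs (c1 c2 : List (Int × List Int)) : List (Int × Int) :=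
  c2.flatMap (fun b => b.2.flatMap (fun p => (pvWho c1 p).map (fun i => (i, b.1))))

theorem pv_foldl_flatMap {α β σ : Type} (l : List α) (g : α → List β) (step : σ → β → σ) (s : σ) :
    (l.flatMap g).foldl step s = l.foldl (fun s a => (g a).foldl step s) s := by
  induction l generalizing s with
  | nil => rfl
  | cons a t ih => simp [List.flatMap_cons, List.foldl_append, ih]

theorem pv_w1_filter (c1 : List (Int × List Int)) (h : ∀ a ∈ c1, a.2.Nodup) (p : Int) :
    ((c1.flatMap (fun a => a.2.map (fun q => (q, a.1)))).filter (fun r => r.1 == p)).map (fun r => r.2)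
      = pvWho c1 p := by
  induction c1 with
  | nil => rfl
  | cons a t ih =>
    have hnd := h a (by simp)
    have ht := ih (fun x hx => h x (by simp [hx]))
    simp only [List.flatMap_cons, List.filter_append, List.map_append, ht, pvWho,
      List.filter_cons]
    have : ((a.2.map (fun q => (q, a.1))).filter (fun r => r.1 == p)).map (fun r => r.2)
        = if p ∈ a.2 then [a.1] else [] := by
      rw [List.filter_map]
      have : (fun r => r.1 == p) ∘ (fun q => (q, a.1)) = (fun q => q == p) := rfl
      rw [this, List.filter_beq]
      rcases Decidable.em (p ∈ a.2) with hm | hm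
      · rw [List.count_eq_one_of_mem hnd hm]; simp [hm]
      · rw [List.count_eq_zero_of_not_mem hm]; simp [hm]
    rw [this]
    by_cases hm : p ∈ a.2 <;> simp [hm]

theorem pv_where_getD (c1 : List (Int × List Int)) (h : ∀ a ∈ c1, a.2.Nodup) (p : Int) :
    (c1.foldl (fun d a => a.2.foldl (fun d q => d.modify q [] (fun l => l ++ [a.1])) d)
      (PySem.Dict.empty : PySem.Dict Int (List Int))).getD p [] = pvWho c1 p := by
  have hshape : (c1.foldl (fun d a => a.2.foldl (fun d q => d.modify q [] (fun l => l ++ [a.1])) d)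
      (PySem.Dict.empty : PySem.Dict Int (List Int)))
      = (c1.flatMap (fun a => a.2.map (fun q => (q, a.1)))).foldl
          (fun d r => d.modify r.1 [] (fun l => l ++ [r.2])) PySem.Dict.empty := by
    rw [pv_foldl_flatMap]
    congr 1
    funext d a
    rw [List.foldl_map]
  rw [hshape, PySem.Dict.getD_foldl_modify_append, pv_w1_filter c1 h p]
  simp [PySem.Dict.getD_empty]

theorem pv_counts_eq_counter (c1 c2 : List (Int × List Int)) (h : ∀ a ∈ c1, a.2.Nodup) :
    (c2.foldl (fun d b => b.2.foldl (fun d p =>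
        ((c1.foldl (fun d a => a.2.foldl (fun d q => d.modify q [] (fun l => l ++ [a.1])) d)
            (PySem.Dict.empty : PySem.Dict Int (List Int))).getD p []).foldl
          (fun d i => d.insert (i, b.1) (d.getD (i, b.1) 0 + 1)) d) d)
      (PySem.Dict.empty : PySem.Dict (Int × Int) Int)) = PySem.Dict.counter (pvOccs c1 c2) := by
  rw [← PySem.Dict.foldl_insert_getD_add_one_eq_counter]
  unfold pvOccs
  rw [pv_foldl_flatMap]
  congr 1
  funext d b
  rw [pv_foldl_flatMap]
  congr 1
  funext d p
  rw [List.foldl_map, pv_where_getD c1 h p]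

theorem pv_who_count (c1 : List (Int × List Int)) (hk1 : (c1.map Prod.fst).Nodup)
    {a : Int × List Int} (ha : a ∈ c1) (p : Int) :
    (pvWho c1 p).count a.1 = if p ∈ a.2 then 1 else 0 := by
  induction c1 with
  | nil => cases ha
  | cons x t ih =>
    simp only [List.map_cons, List.nodup_cons] at hk1
    have step : pvWho (x :: t) p = (if p ∈ x.2 then [x.1] else []) ++ pvWho t p := by
      simp only [pvWho, List.filter_cons]
      by_cases hm : p ∈ x.2 <;> simp [hm]
    rcases List.mem_cons.1 ha with rfl | hat
    · have hz : (pvWho t p).count a.1 = 0 := by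
        rw [List.count_eq_zero]
        intro hmem
        apply hk1.1
        simp only [pvWho, List.mem_map, List.mem_filter] at hmem
        obtain ⟨a', ⟨ha't, _⟩, he⟩ := hmem
        exact he ▸ List.mem_map_of_mem ha't
      rw [step, List.count_append, hz]
      by_cases hm : p ∈ a.2 <;> simp [hm]
    · have hne : a.1 ≠ x.1 := fun he => hk1.1 (he ▸ List.mem_map_of_mem hat)
      rw [step, List.count_append, ih hk1.2 hat]
      by_cases hm : p ∈ x.2 <;> simp [hm, Ne.symm hne]

theorem pv_sum_ite (a : Int × List Int) (l : List Int) :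
    (l.map (fun p => if p ∈ a.2 then 1 else 0)).sum = (l.filter (fun p => p ∈ a.2)).length := by
  induction l with
  | nil => rfl
  | cons x t ih => by_cases hm : x ∈ a.2 <;> simp [hm, ih] <;> omega

theorem pv_filter_symm {a b : Int × List Int} (ha : a.2.Nodup) (hb : b.2.Nodup) :
    (b.2.filter (fun p => p ∈ a.2)).length = (a.2.filter (fun p => p ∈ b.2)).length := by
  have hperm : List.Perm (b.2.filter (fun p => p ∈ a.2)) (a.2.filter (fun p => p ∈ b.2)) := by
    rw [List.perm_ext_iff_of_nodup (hb.filter _) (ha.filter _)]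
    intro x
    simp only [List.mem_filter, decide_eq_true_eq]
    tauto
  exact hperm.length_eq

theorem pv_flatMap_count (a1 : Int) {b : Int × List Int} (c2 : List (Int × List Int))
    (g : (Int × List Int) → List (Int × Int))
    (hg : ∀ b' ∈ c2, ∀ q ∈ g b', q.2 = b'.1)
    (hk2 : (c2.map Prod.fst).Nodup) (hb : b ∈ c2) :
    (c2.flatMap g).count (a1, b.1) = (g b).count (a1, b.1) := by
  induction c2 with
  | nil => cases hb
  | cons x t ih =>
    simp only [List.map_cons, List.nodup_cons] at hk2
    rw [List.flatMap_cons, List.count_append]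
    rcases List.mem_cons.1 hb with rfl | hbt
    · have hz : (t.flatMap g).count (a1, b.1) = 0 := by
        rw [List.count_eq_zero]
        intro hmem
        obtain ⟨b', hb't, hq⟩ := List.mem_flatMap.1 hmem
        have : (b.1 : Int) = b'.1 := hg b' (List.mem_cons_of_mem _ hb't) _ hq
        exact hk2.1 (this ▸ List.mem_map_of_mem hb't)
      rw [hz]; omega
    · have hz : (g x).count (a1, b.1) = 0 := by
        rw [List.count_eq_zero]
        intro hmem
        have : (b.1 : Int) = x.1 := hg x (List.mem_cons_self) _ hmem
        exact hk2.1 (this ▸ List.mem_map_of_mem hbt)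
      rw [hz, ih (fun b' h q hq => hg b' (List.mem_cons_of_mem _ h) q hq) hk2.2 hbt]
      omega

theorem pv_occs_count (c1 c2 : List (Int × List Int))
    (hk1 : (c1.map Prod.fst).Nodup) (hk2 : (c2.map Prod.fst).Nodup)
    (hv1 : ∀ a ∈ c1, a.2.Nodup) (hv2 : ∀ b ∈ c2, b.2.Nodup)
    {a b : Int × List Int} (ha : a ∈ c1) (hb : b ∈ c2) :
    ((pvOccs c1 c2).count (a.1, b.1) : Int) = pvF a b := by
  have houter : (pvOccs c1 c2).count (a.1, b.1)
      = (b.2.flatMap (fun p => (pvWho c1 p).map (fun i => (i, b.1)))).count (a.1, b.1) := by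
    apply pv_flatMap_count a.1 c2 _ _ hk2 hb
    intro b' _ q hq
    obtain ⟨p, _, i, _, he⟩ := by
      simpa only [List.mem_flatMap, List.mem_map] using hq
    exact he ▸ rfl
  have hinner : (b.2.flatMap (fun p => (pvWho c1 p).map (fun i => (i, b.1)))).count (a.1, b.1)
      = (b.2.filter (fun p => p ∈ a.2)).length := by
    rw [List.count_flatMap]
    have hmap : ∀ p : Int, ((pvWho c1 p).map (fun i => (i, b.1))).count (a.1, b.1)
        = if p ∈ a.2 then 1 else 0 := by
      intro p
      have hinj : Function.Injective (fun i : Int => (i, b.1)) := by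
        intro x y hxy; simpa using hxy
      rw [show ((a.1, b.1) : Int × Int) = (fun i : Int => (i, b.1)) a.1 from rfl,
        List.count_map_of_injective _ _ hinj, pv_who_count c1 hk1 ha p]
    simp only [Function.comp_def, hmap]
    exact pv_sum_ite a b.2
  rw [houter, hinner, pv_filter_symm (hv1 a ha) (hv2 b hb)]
  unfold pvF
  have hc : (fun p => b.2.contains p) = (fun p : Int => decide (p ∈ b.2)) := by
    funext p; by_cases h : p ∈ b.2 <;> simp [h]
  rw [hc]

theorem pv_mem_occs (c1 c2 : List (Int × List Int)) {q : Int × Int} (h : q ∈ pvOccs c1 c2) :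
    ∃ a ∈ c1, ∃ b ∈ c2, q = (a.1, b.1) := by
  simp only [pvOccs, pvWho, List.mem_flatMap, List.mem_map, List.mem_filter] at h
  obtain ⟨b, hb, p, _, i, ⟨a, ⟨hac, _⟩, he⟩, hq⟩ := h
  exact ⟨a, hac, b, hb, by rw [← hq, ← he]⟩

theorem pv_occs_of_pos (c1 c2 : List (Int × List Int)) {a b : Int × List Int}
    (ha : a ∈ c1) (hb : b ∈ c2) (hpos : 0 < pvF a b) : (a.1, b.1) ∈ pvOccs c1 c2 := by
  unfold pvF at hpos
  have : (a.2.filter (fun p => b.2.contains p)) ≠ [] := by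
    intro he; rw [he] at hpos; simp at hpos
  obtain ⟨p, hp⟩ := List.exists_mem_of_ne_nil _ this
  have hp' := List.mem_filter.1 hp
  simp only [pvOccs, List.mem_flatMap, List.mem_map]
  refine ⟨b, hb, p, ?_, a.1, ?_, rfl⟩
  · simpa [List.contains_iff_mem] using hp'.2
  · simp only [pvWho, List.mem_map, List.mem_filter]
    exact ⟨a, ⟨ha, by simp [hp'.1]⟩, rfl⟩

theorem pv_A_eq (c1 c2 : List (Int × List Int)) (hk1 : (c1.map Prod.fst).Nodup)
    (hk2 : (c2.map Prod.fst).Nodup) :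
    get_number_of_common_points c1 c2 = (PySem.List.max? (pvLens c1 c2) (fun x => x)).getD 0 := by
  unfold get_number_of_common_points
  have hget1 : ∀ a ∈ c1, (PySem.Dict.mk c1).getD a.1 [] = a.2 := by
    intro a ha
    exact PySem.Dict.getD_of_mem_items _ (by exact ha) (by simpa [PySem.Dict.keys] using hk1) _
  have hget2 : ∀ b ∈ c2, (PySem.Dict.mk c2).getD b.1 [] = b.2 := by
    intro b hb
    exact PySem.Dict.getD_of_mem_items _ (by exact hb) (by simpa [PySem.Dict.keys] using hk2) _
  have hkeys1 : (PySem.Dict.mk c1).keys = c1.map Prod.fst := rfl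
  have hkeys2 : (PySem.Dict.mk c2).keys = c2.map Prod.fst := rfl
  simp only [hkeys1, hkeys2, List.flatMap_map, List.map_map]
  congr 2
  apply List.flatMap_congr
  intro a ha
  apply List.map_congr_left
  intro b hb
  simp only [Function.comp]
  rw [hget1 a ha, hget2 b hb]
  rfl

theorem pv_B_eq (c1 c2 : List (Int × List Int)) (hv1 : ∀ a ∈ c1, a.2.Nodup) :
    get_number_of_common_points_alt c1 c2 =
      ((PySem.Set.ofList (pvOccs c1 c2)).map (fun q => ((pvOccs c1 c2).count q : Int))).foldl max 0 := by
  show ((c2.foldl (fun d b => b.2.foldl (fun d p =>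
        ((c1.foldl (fun d a => a.2.foldl (fun d q => d.modify q [] (fun l => l ++ [a.1])) d)
            (PySem.Dict.empty : PySem.Dict Int (List Int))).getD p []).foldl
          (fun d i => d.insert (i, b.1) (d.getD (i, b.1) 0 + 1)) d) d)
      (PySem.Dict.empty : PySem.Dict (Int × Int) Int)).values).foldl (fun best c => max best c) 0 = _
  rw [pv_counts_eq_counter c1 c2 hv1]
  have hvals : (PySem.Dict.counter (pvOccs c1 c2)).values
      = (PySem.Set.ofList (pvOccs c1 c2)).map (fun q => ((pvOccs c1 c2).count q : Int)) := by
    have : (PySem.Dict.counter (pvOccs c1 c2)).values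
        = (PySem.Dict.counter (pvOccs c1 c2)).items.map (fun p => p.2) := rfl
    rw [this, PySem.Dict.items_counter, List.map_map]
    rfl
  rw [hvals]

theorem pv_main (c1 c2 : List (Int × List Int)) (h1 : c1 ≠ []) (h2 : c2 ≠ [])
    (hk1 : (c1.map Prod.fst).Nodup) (hk2 : (c2.map Prod.fst).Nodup)
    (hv1 : ∀ a ∈ c1, a.2.Nodup) (hv2 : ∀ b ∈ c2, b.2.Nodup) :
    (PySem.List.max? (pvLens c1 c2) (fun x => x)).getD 0 =
      ((PySem.Set.ofList (pvOccs c1 c2)).map (fun q => ((pvOccs c1 c2).count q : Int))).foldl max 0 := by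
  set L := pvLens c1 c2 with hL
  set M := (PySem.Set.ofList (pvOccs c1 c2)).map (fun q => ((pvOccs c1 c2).count q : Int)) with hM
  have hmemL : ∀ y, y ∈ L ↔ ∃ a ∈ c1, ∃ b ∈ c2, y = pvF a b := by
    intro y
    simp only [hL, pvLens, List.mem_flatMap, List.mem_map]
    constructor
    · rintro ⟨a, ha, b, hb, rfl⟩; exact ⟨a, ha, b, hb, rfl⟩
    · rintro ⟨a, ha, b, hb, rfl⟩; exact ⟨a, ha, b, hb, rfl⟩
  have hnonnegL : ∀ y ∈ L, (0 : Int) ≤ y := by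
    intro y hy
    obtain ⟨a, _, b, _, rfl⟩ := (hmemL y).1 hy
    exact Int.natCast_nonneg _
  obtain ⟨a0, ha0⟩ := List.exists_mem_of_ne_nil c1 h1
  obtain ⟨b0, hb0⟩ := List.exists_mem_of_ne_nil c2 h2
  have hLne : L ≠ [] := by
    apply List.ne_nil_of_mem (a := pvF a0 b0)
    exact (hmemL _).2 ⟨a0, ha0, b0, hb0, rfl⟩
  obtain ⟨x, t, hLxt⟩ := List.exists_cons_of_ne_nil hLne
  have hmaxL : PySem.List.max? L (fun x => x) = some (t.foldl max x) := by
    rw [hLxt]; exact PySem.List.max?_id_cons x t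
  set Aval := t.foldl max x with hAval
  set Bval := M.foldl max 0 with hBval
  have hAmem : Aval ∈ L := by
    rw [hLxt]
    rcases PySem.List.foldl_max_mem t x with h | h
    · rw [hAval, h]; exact List.mem_cons_self
    · exact List.mem_cons_of_mem _ h
  have hAub : ∀ y ∈ L, y ≤ Aval := fun y hy => PySem.List.max?_isMax hmaxL y hy
  have hBub : ∀ m ∈ M, m ≤ Bval := (PySem.List.le_foldl_max M 0).2
  have hB0 : (0 : Int) ≤ Bval := (PySem.List.le_foldl_max M 0).1
  have hMsubL : ∀ m ∈ M, m ∈ L := by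
    intro m hm
    obtain ⟨q, hq, rfl⟩ := List.mem_map.1 hm
    obtain ⟨a, ha, b, hb, rfl⟩ := pv_mem_occs c1 c2 ((PySem.Set.mem_ofList _ _).1 hq)
    rw [pv_occs_count c1 c2 hk1 hk2 hv1 hv2 ha hb]
    exact (hmemL _).2 ⟨a, ha, b, hb, rfl⟩
  have hLleB : ∀ y ∈ L, y ≤ Bval := by
    intro y hy
    obtain ⟨a, ha, b, hb, rfl⟩ := (hmemL y).1 hy
    by_cases hpos : 0 < pvF a b
    · have hqmem : ((a.1, b.1) : Int × Int) ∈ PySem.Set.ofList (pvOccs c1 c2) :=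
        (PySem.Set.mem_ofList _ _).2 (pv_occs_of_pos c1 c2 ha hb hpos)
      have : ((pvOccs c1 c2).count (a.1, b.1) : Int) ∈ M := List.mem_map_of_mem hqmem
      have hle := hBub _ this
      rwa [pv_occs_count c1 c2 hk1 hk2 hv1 hv2 ha hb] at hle
    · exact le_trans (by omega) hB0
  rw [hmaxL]
  show Aval = Bval
  apply le_antisymm
  · exact hLleB _ hAmem
  · rcases PySem.List.foldl_max_mem M 0 with h | h
    · rw [hBval, h]; exact hnonnegL _ hAmem
    · exact hAub _ (hMsubL _ h)

-- ===== VERDICT (by name: the statement is the Claim_ definition above) =====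
theorem get_number_of_common_points_spec : Claim_equal_get_number_of_common_points := by
  intro c1 c2 _ hpre
  obtain ⟨h1, h2, hk1, hk2, hv1, hv2⟩ := hpre
  show get_number_of_common_points c1 c2 = get_number_of_common_points_alt c1 c2
  rw [pv_A_eq c1 c2 hk1 hk2, pv_B_eq c1 c2 hv1, pv_main c1 c2 h1 h2 hk1 hk2 hv1 hv2]
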